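-- pv_equiv track=rewrite | github.com/rikicamme01/DialogiTECH | src/IE_train.py | pred_to_bounds
-- ===== SOURCE A (Python) =====
-- def pred_to_bounds(pred: list):
--     dataset_bounds = []
--     for e in pred:
--         start = 0
--         end = 0
--         bounds = []
--         for i, tok_pred in enumerate(e):
--             if tok_pred == 0:
--                 end = i
--                 bounds.append((start, end))
--                 start = end + 1
--         dataset_bounds.append(bounds)
--     return dataset_bounds
-- ===== SOURCE B (Python) =====
-- def pred_to_bounds(pred: list):
--     dataset_bounds = []
--     for e in pred:
--         zs = [i for i, t in enumerate(e) if t == 0]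
--         starts = [0] + [z + 1 for z in zs[:-1]]
--         dataset_bounds.append(list(zip(starts, zs)))
--     return dataset_bounds
-- ===== Notes on version B (the rewrite author's own statement) =====
-- stated objective: alternative
-- what changed: Per element, B first collects the list of zero positions and then builds all bounds at once by zipping shifted start positions with it, instead of A's running start/end accumulator that emits tuples inside the scan.
import Mathlib
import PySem

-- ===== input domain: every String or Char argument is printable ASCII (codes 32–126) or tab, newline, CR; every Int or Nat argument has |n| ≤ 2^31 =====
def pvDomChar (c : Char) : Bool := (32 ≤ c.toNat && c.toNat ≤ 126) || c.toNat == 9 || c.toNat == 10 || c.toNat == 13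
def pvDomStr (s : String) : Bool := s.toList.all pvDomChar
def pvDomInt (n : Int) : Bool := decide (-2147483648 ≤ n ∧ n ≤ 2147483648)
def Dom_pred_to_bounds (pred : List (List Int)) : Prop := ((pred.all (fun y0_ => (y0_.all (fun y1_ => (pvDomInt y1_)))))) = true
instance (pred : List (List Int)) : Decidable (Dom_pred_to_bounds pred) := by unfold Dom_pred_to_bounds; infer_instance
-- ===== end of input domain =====

-- B collects the zero positions per element and zips shifted starts with them,
-- replacing A's running start/end accumulator; alternative decomposition, same cost.


-- ===== PORT A =====
-- inner loop: running (start, bounds) state over enumerate(e)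
def pvAInner (e : List Int) : List (Int × Int) :=
  ((PySem.List.enumerate e).foldl
    (fun (st : Int × List (Int × Int)) (p : Int × Int) =>
      if p.2 == 0 then (p.1 + 1, st.2 ++ [(st.1, p.1)]) else st)
    ((0 : Int), ([] : List (Int × Int)))).2

def pred_to_bounds (pred : List (List Int)) : List (List (Int × Int)) :=
  pred.foldl (fun acc e => acc ++ [pvAInner e]) []

-- ===== PORT B =====
-- zs = zero positions; starts = [0] + [z+1 for z in zs[:-1]]; zip starts zs
def pvBInner (e : List Int) : List (Int × Int) :=
  let zs := ((PySem.List.enumerate e).filter (fun p => p.2 == 0)).map (·.1)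
  let starts := (0 : Int) :: (PySem.List.slice zs (some 0) (some (-1))).map (· + 1)
  starts.zip zs

def pred_to_bounds_alt (pred : List (List Int)) : List (List (Int × Int)) :=
  (pred.map pvBInner)

-- ===== PRECONDITION & SPEC =====
def Spec_pred_to_bounds (pred : List (List Int)) (out : List (List (Int × Int))) : Prop := out = pred_to_bounds_alt pred
instance (pred : List (List Int)) (out : List (List (Int × Int))) : Decidable (Spec_pred_to_bounds pred out) := by unfold Spec_pred_to_bounds; infer_instance

-- ===== CLAIM (what is proved, stated in full; the proofs are below) =====
def Claim_equal_pred_to_bounds : Prop := ∀ (pred : List (List Int)), Dom_pred_to_bounds pred → Spec_pred_to_bounds pred (pred_to_bounds pred)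

-- ===== LEMMAS AND PROOFS =====

-- invariant of A's inner fold, for any list of (index, token) pairs
theorem pvAInner_invariant (ps : List (Int × Int)) (s : Int) (acc : List (Int × Int)) :
    (ps.foldl
      (fun (st : Int × List (Int × Int)) (p : Int × Int) =>
        if p.2 == 0 then (p.1 + 1, st.2 ++ [(st.1, p.1)]) else st)
      (s, acc)).2
    = acc ++ (s :: ((ps.filter (fun p => p.2 == 0)).map (·.1)).dropLast.map (· + 1)).zip
              ((ps.filter (fun p => p.2 == 0)).map (·.1)) := by
  induction ps generalizing s acc with
  | nil => simp
  | cons p t ih =>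
    by_cases h : p.2 = 0
    · simp only [List.foldl_cons, h, beq_self_eq_true, if_true]
      rw [ih]
      cases hz : (t.filter (fun p => p.2 == 0)).map (·.1) with
      | nil => simp [h, hz]
      | cons z zt => simp [h, hz]
    · have hb : (p.2 == 0) = false := by simpa using h
      simp only [List.foldl_cons, hb, Bool.false_eq_true, if_false]
      rw [ih]
      simp [h]

theorem pvInner_eq (e : List Int) : pvAInner e = pvBInner e := by
  unfold pvAInner pvBInner
  rw [pvAInner_invariant]
  simp [PySem.List.slice_to_neg_one, List.map_dropLast]

theorem pv_foldl_snoc {α β : Type} (f : α → β) (xs : List α) (acc : List β) :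
    xs.foldl (fun a e => a ++ [f e]) acc = acc ++ xs.map f := by
  induction xs generalizing acc with
  | nil => simp
  | cons x t ih => simp [ih]

-- ===== VERDICT (by name: the statement is the Claim_ definition above) =====
theorem pred_to_bounds_spec : Claim_equal_pred_to_bounds := by
  intro pred _
  unfold Spec_pred_to_bounds pred_to_bounds pred_to_bounds_alt
  rw [pv_foldl_snoc]
  simp [pvInner_eq]
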